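-- pv_equiv track=rewrite | github.com/rimgosu/AutoEditor | AutoEditor/runAutoEditor.py | start_end
-- ===== SOURCE A (Python) =====
-- def set_list_sort(index):
--     index = set(index)
--     index = list(index)
--     index.sort()
--     return index
--
-- def start_end(index, threshold=1):
--     return_index = []
--     return_index.append(index[0])
--     return_index.append(index[len(index)-1])
--     for j in range(len(index)-1):
--         if index[j+1] - index[j] <= threshold:
--             pass
--         else:
--             return_index.append(index[j])
--             return_index.append(index[j+1])
--     return_index = set_list_sort(return_index)
--     return return_index
-- ===== SOURCE B (Python) =====
-- def start_end(index, threshold=1):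
--     # Divide and conquer: recursively split the index range in half; each half
--     # contributes its interior break pairs, the junction pair is checked at the
--     # split point; endpoints are added at the top, then dedup + sort.
--     first = index[0]
--
--     def rec(lo, hi):
--         if hi - lo <= 1:
--             return []
--         mid = (lo + hi) // 2
--         joint = ([index[mid - 1], index[mid]]
--                  if index[mid] - index[mid - 1] > threshold else [])
--         return rec(lo, mid) + joint + rec(mid, hi)
--
--     return sorted(set([first, index[-1]] + rec(0, len(index))))
-- ===== Notes on version B (the rewrite author's own statement) =====
-- stated objective: alternative
-- what changed: B computes the break pairs by divide-and-conquer recursion that halves the index range and checks only the junction pair at each split, instead of A's single indexed loop over all adjacent pairs; endpoints are added once at the top, then dedup + sort.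
import Mathlib
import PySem

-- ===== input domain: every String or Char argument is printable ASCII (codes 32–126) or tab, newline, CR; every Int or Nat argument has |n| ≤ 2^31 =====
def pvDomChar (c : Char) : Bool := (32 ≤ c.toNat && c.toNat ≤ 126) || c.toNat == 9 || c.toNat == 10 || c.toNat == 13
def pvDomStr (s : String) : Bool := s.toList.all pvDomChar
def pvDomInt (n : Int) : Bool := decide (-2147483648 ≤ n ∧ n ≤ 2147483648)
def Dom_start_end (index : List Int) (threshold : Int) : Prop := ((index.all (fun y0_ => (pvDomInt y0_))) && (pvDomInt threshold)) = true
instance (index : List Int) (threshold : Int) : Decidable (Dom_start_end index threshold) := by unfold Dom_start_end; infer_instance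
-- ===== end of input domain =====

-- B finds the break pairs by divide-and-conquer over the position range (junction check at
-- each split) instead of A's single indexed loop over all adjacent pairs; same dedup + sort.

-- ===== PORT A =====
def start_end (index : List Int) (threshold : Int) : List Int :=
  let return_index : List Int :=
    [PySem.List.pyGetD index 0 0, PySem.List.pyGetD index ((index.length : Int) - 1) 0]
  let return_index :=
    (PySem.List.pyRange 0 ((index.length : Int) - 1) 1).foldl
      (fun acc j =>
        if PySem.List.pyGetD index (j + 1) 0 - PySem.List.pyGetD index j 0 ≤ threshold then acc
        else acc ++ [PySem.List.pyGetD index j 0, PySem.List.pyGetD index (j + 1) 0])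
      return_index
  PySem.List.sorted (PySem.Set.ofList return_index) (fun x => x)

-- ===== PORT B =====
-- the inner 'rec(lo, hi)' of Source B; the Nat fuel (= range length at the top call) only
-- makes the halving recursion structural, it never cuts the computation short
def pvRecB (index : List Int) (threshold : Int) : Nat → Int → Int → List Int
  | 0, _, _ => []
  | fuel + 1, lo, hi =>
    if hi - lo ≤ 1 then []
    else
      let mid := PySem.Int.floordiv (lo + hi) 2
      let joint :=
        if PySem.List.pyGetD index mid 0 - PySem.List.pyGetD index (mid - 1) 0 > threshold then
          [PySem.List.pyGetD index (mid - 1) 0, PySem.List.pyGetD index mid 0]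
        else []
      pvRecB index threshold fuel lo mid ++ joint ++ pvRecB index threshold fuel mid hi

def start_end_alt (index : List Int) (threshold : Int) : List Int :=
  let first := PySem.List.pyGetD index 0 0
  PySem.List.sorted
    (PySem.Set.ofList
      ([first, PySem.List.pyGetD index (-1) 0]
        ++ pvRecB index threshold index.length 0 (index.length : Int)))
    (fun x => x)

-- ===== PRECONDITION & SPEC =====
-- Pre_ excludes exactly the empty list, on which A raises IndexError (index[0]).
def Pre_start_end (index : List Int) (threshold : Int) : Prop := index ≠ []
instance (index : List Int) (threshold : Int) : Decidable (Pre_start_end index threshold) := by unfold Pre_start_end; infer_instance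
def pvWitness_start_end : List Int × Int := ([3, 4, 9], 1)

def Spec_start_end (index : List Int) (threshold : Int) (out : List Int) : Prop := out = start_end_alt index threshold
instance (index : List Int) (threshold : Int) (out : List Int) : Decidable (Spec_start_end index threshold out) := by unfold Spec_start_end; infer_instance

-- ===== CLAIM =====
def Claim_equal_start_end : Prop := ∀ (index : List Int) (threshold : Int), Dom_start_end index threshold → Pre_start_end index threshold → Spec_start_end index threshold (start_end index threshold)

-- ===== LEMMAS AND PROOFS =====

-- the break pairs contributed by the indices of js, as one flat list
def pvPairs (index : List Int) (threshold : Int) (js : List Int) : List Int :=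
  js.flatMap (fun j =>
    if PySem.List.pyGetD index (j + 1) 0 - PySem.List.pyGetD index j 0 ≤ threshold then []
    else [PySem.List.pyGetD index j 0, PySem.List.pyGetD index (j + 1) 0])

-- A's loop in closed form
theorem foldA_eq (index : List Int) (threshold : Int) (js : List Int) (acc : List Int) :
    js.foldl
      (fun acc j =>
        if PySem.List.pyGetD index (j + 1) 0 - PySem.List.pyGetD index j 0 ≤ threshold then acc
        else acc ++ [PySem.List.pyGetD index j 0, PySem.List.pyGetD index (j + 1) 0]) acc
      = acc ++ pvPairs index threshold js := by
  induction js generalizing acc with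
  | nil => simp [pvPairs]
  | cons j js ih =>
    rw [List.foldl_cons]
    by_cases h : PySem.List.pyGetD index (j + 1) 0 - PySem.List.pyGetD index j 0 ≤ threshold
    · rw [if_pos h, ih]
      simp only [pvPairs, List.flatMap_cons, if_pos h, List.nil_append]
    · rw [if_neg h, ih]
      simp only [pvPairs, List.flatMap_cons, if_neg h, List.append_assoc, List.cons_append,
        List.nil_append]

-- B's divide-and-conquer produces exactly the break pairs of the index range [lo, hi-1)
theorem pvRecB_eq (index : List Int) (threshold : Int) :
    ∀ (fuel : Nat) (lo hi : Int), (hi - lo).toNat ≤ fuel →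
      pvRecB index threshold fuel lo hi
        = pvPairs index threshold (PySem.List.pyRange lo (hi - 1) 1) := by
  intro fuel
  induction fuel with
  | zero =>
    intro lo hi hn
    rw [pvRecB, PySem.List.pyRange_one_eq_nil (by omega)]
    simp [pvPairs]
  | succ fuel ih =>
    intro lo hi hn
    by_cases h : hi - lo ≤ 1
    · rw [pvRecB, if_pos h, PySem.List.pyRange_one_eq_nil (by omega)]
      simp [pvPairs]
    · have h1 : lo + 1 ≤ PySem.Int.floordiv (lo + hi) 2 :=
        (PySem.Int.le_floordiv_iff_mul_le (by omega)).mpr (by omega)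
      have h2 : PySem.Int.floordiv (lo + hi) 2 < hi :=
        (PySem.Int.floordiv_lt_iff_lt_mul (by omega)).mpr (by omega)
      rw [pvRecB, if_neg h]
      show pvRecB index threshold fuel lo (PySem.Int.floordiv (lo + hi) 2)
          ++ (if PySem.List.pyGetD index (PySem.Int.floordiv (lo + hi) 2) 0
                - PySem.List.pyGetD index (PySem.Int.floordiv (lo + hi) 2 - 1) 0 > threshold then
              [PySem.List.pyGetD index (PySem.Int.floordiv (lo + hi) 2 - 1) 0,
               PySem.List.pyGetD index (PySem.Int.floordiv (lo + hi) 2) 0]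
            else [])
          ++ pvRecB index threshold fuel (PySem.Int.floordiv (lo + hi) 2) hi
          = pvPairs index threshold (PySem.List.pyRange lo (hi - 1) 1)
      rw [ih lo (PySem.Int.floordiv (lo + hi) 2) (by omega),
          ih (PySem.Int.floordiv (lo + hi) 2) hi (by omega)]
      rw [PySem.List.pyRange_one_append lo (PySem.Int.floordiv (lo + hi) 2 - 1) (hi - 1)
            (by omega) (by omega),
          PySem.List.pyRange_one_cons (a := PySem.Int.floordiv (lo + hi) 2 - 1)
            (b := hi - 1) (by omega)]
      simp only [pvPairs, List.flatMap_append, List.flatMap_cons]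
      have hm : PySem.Int.floordiv (lo + hi) 2 - 1 + 1 = PySem.Int.floordiv (lo + hi) 2 := by
        omega
      rw [hm]
      by_cases hc : PySem.List.pyGetD index (PySem.Int.floordiv (lo + hi) 2) 0
          - PySem.List.pyGetD index (PySem.Int.floordiv (lo + hi) 2 - 1) 0 ≤ threshold
      · rw [if_neg (by omega), if_pos hc]
        simp
      · rw [if_pos (by omega), if_neg hc]
        simp

theorem pyGetD_neg_one_eq (xs : List Int) (h : xs ≠ []) :
    PySem.List.pyGetD xs (-1) 0 = PySem.List.pyGetD xs ((xs.length : Int) - 1) 0 := by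
  cases xs with
  | nil => simp at h
  | cons x xs =>
    simp [PySem.List.pyGetD, PySem.List.pyGet?, PySem.List.pyIdx?]

-- ===== VERDICT =====
theorem start_end_spec : Claim_equal_start_end := by
  intro index threshold _ hpre
  unfold Spec_start_end
  simp only [start_end, start_end_alt]
  rw [foldA_eq, pvRecB_eq index threshold index.length 0 (index.length : Int) (by omega),
    pyGetD_neg_one_eq index hpre]
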